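-- pv_equiv track=rewrite | github.com/VsevolodKozlov-git/hse_work | exercises/first_part/ex3.py | get_rest_scores
-- ===== SOURCE A (Python) =====
-- def get_rest_scores(restaurants):
--     rest_scores = {}
--     point_mapper = {
--         '++': 2,
--         '+': 1,
--         '-': -1,
--         '--': -2
--     }
--     for reviews in restaurants.values():
--         for rest, points_str in reviews.items():
--             points_int = point_mapper[points_str]
--             if rest not in rest_scores:
--                 rest_scores[rest] = {}
--                 rest_scores[rest]['min_points'] = 2
--                 rest_scores[rest]['++'] = 0
--             # update minimum points if needed
--             if points_int < rest_scores[rest]['min_points']: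
--                 rest_scores[rest]['min_points'] = points_int
--             # update ++
--             if points_int == 2:
--                 rest_scores[rest]['++'] += 1
--     return rest_scores
-- ===== SOURCE B (Python) =====
-- def get_rest_scores(restaurants):
--     point_mapper = {
--         '++': 2,
--         '+': 1,
--         '-': -1,
--         '--': -2
--     }
--     grouping = {}
--     for reviews in restaurants.values():
--         for rest, points_str in reviews.items():
--             grouping.setdefault(rest, []).append(point_mapper[points_str])
--     return {rest: {'min_points': min(vals), '++': vals.count(2)}
--             for rest, vals in grouping.items()}
-- ===== Notes on version B (the rewrite author's own statement) =====
-- stated objective: alternative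
-- what changed: Replaces A's running per-restaurant min/count accumulators updated in place with a two-pass grouping: first collect each restaurant's mapped scores into a list, then aggregate min and ++ count per group (correct because all mapped scores are <= 2 and every grouped restaurant has at least one review).
import Mathlib
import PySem

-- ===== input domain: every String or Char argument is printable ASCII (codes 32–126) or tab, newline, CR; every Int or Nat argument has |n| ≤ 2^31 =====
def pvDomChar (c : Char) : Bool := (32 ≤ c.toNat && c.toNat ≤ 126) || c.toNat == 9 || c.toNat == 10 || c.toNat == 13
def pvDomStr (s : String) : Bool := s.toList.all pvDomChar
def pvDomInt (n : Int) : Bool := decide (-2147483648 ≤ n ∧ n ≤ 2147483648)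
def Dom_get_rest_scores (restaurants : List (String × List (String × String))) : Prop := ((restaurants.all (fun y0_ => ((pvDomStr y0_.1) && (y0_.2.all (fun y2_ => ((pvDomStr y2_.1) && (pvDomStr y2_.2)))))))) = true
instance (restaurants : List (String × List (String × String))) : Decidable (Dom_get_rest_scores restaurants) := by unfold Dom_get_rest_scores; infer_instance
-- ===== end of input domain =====

-- B replaces A's in-place running min/count accumulators by a two-pass grouping (collect each
-- restaurant's mapped scores, then aggregate min and '++' count per group); same cost, different structure.

-- ===== PORT A =====
def pvPointMapper : PySem.Dict String Int :=
  PySem.Dict.ofList [("++", 2), ("+", 1), ("-", -1), ("--", -2)]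

-- point_mapper[points_str]; the KeyError inputs (points_str not a key) are excluded by Pre_,
-- so the 0 default is never read under the claim
def pvMapPoint (s : String) : Int := (PySem.Dict.get? pvPointMapper s).getD 0

def pvStepA (d : PySem.Dict String (PySem.Dict String Int)) (p : String × String) :
    PySem.Dict String (PySem.Dict String Int) :=
  let points_int := pvMapPoint p.2
  let d1 := if !(d.contains p.1) then
      d.insert p.1 ((PySem.Dict.empty.insert "min_points" 2).insert "++" 0)
    else d
  let d2 := if points_int < (d1.getD p.1 PySem.Dict.empty).getD "min_points" 0 then
      d1.modify p.1 PySem.Dict.empty (fun inner => inner.insert "min_points" points_int)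
    else d1
  if points_int == 2 then
    d2.modify p.1 PySem.Dict.empty (fun inner => inner.modify "++" 0 (· + 1))
  else d2

def get_rest_scores (restaurants : List (String × List (String × String))) :
    List (String × List (String × Int)) :=
  ((restaurants.foldl (fun d r => r.2.foldl pvStepA d) PySem.Dict.empty).items.map
    (fun q => (q.1, q.2.items)))

-- ===== PORT B =====
def get_rest_scores_alt (restaurants : List (String × List (String × String))) :
    List (String × List (String × Int)) :=
  let grouping := restaurants.foldl
    (fun g r => r.2.foldl
      (fun g p => g.modify p.1 [] (fun vals => vals ++ [pvMapPoint p.2])) g)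
    PySem.Dict.empty
  grouping.items.map (fun q =>
    (q.1, [("min_points", (PySem.List.min? q.2 (fun v => v)).getD 0),
           ("++", (q.2.count 2 : Int))]))

-- ===== PRECONDITION & SPEC =====
-- Pre_ excludes review values outside point_mapper's four keys (A raises KeyError there) and
-- association lists with duplicate outer or inner keys, which do not represent a Python dict.
def Pre_get_rest_scores (restaurants : List (String × List (String × String))) : Prop :=
  (restaurants.map Prod.fst).Nodup ∧
  ∀ r ∈ restaurants, (r.2.map Prod.fst).Nodup ∧
    ∀ p ∈ r.2, p.2 ∈ (["++", "+", "-", "--"] : List String)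
instance (restaurants : List (String × List (String × String))) : Decidable (Pre_get_rest_scores restaurants) := by unfold Pre_get_rest_scores; infer_instance

def pvWitness_get_rest_scores : (List (String × List (String × String))) :=
  [("alice", [("rest1", "++"), ("rest2", "-")]), ("bob", [("rest1", "--")])]

def Spec_get_rest_scores (restaurants : List (String × List (String × String))) (out : List (String × List (String × Int))) : Prop := out = get_rest_scores_alt restaurants
instance (restaurants : List (String × List (String × String))) (out : List (String × List (String × Int))) : Decidable (Spec_get_rest_scores restaurants out) := by unfold Spec_get_rest_scores; infer_instance

-- ===== CLAIM (what is proved, stated in full; the proofs are below) =====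
def Claim_equal_get_rest_scores : Prop := ∀ (restaurants : List (String × List (String × String))), Dom_get_rest_scores restaurants → Pre_get_rest_scores restaurants → Spec_get_rest_scores restaurants (get_rest_scores restaurants)

-- ===== LEMMAS AND PROOFS =====

-- the per-review step of A's loop, with the score already mapped to an Int
def pvStepA' (d : PySem.Dict String (PySem.Dict String Int)) (q : String × Int) :
    PySem.Dict String (PySem.Dict String Int) :=
  let d1 := if !(d.contains q.1) then
      d.insert q.1 ((PySem.Dict.empty.insert "min_points" 2).insert "++" 0)
    else d
  let d2 := if q.2 < (d1.getD q.1 PySem.Dict.empty).getD "min_points" 0 then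
      d1.modify q.1 PySem.Dict.empty (fun inner => inner.insert "min_points" q.2)
    else d1
  if q.2 == 2 then
    d2.modify q.1 PySem.Dict.empty (fun inner => inner.modify "++" 0 (· + 1))
  else d2

-- the flattened, score-mapped review stream both loops traverse
def pvQs (restaurants : List (String × List (String × String))) : List (String × Int) :=
  (restaurants.flatMap (fun r => r.2)).map (fun p => (p.1, pvMapPoint p.2))

def pvVs (qs : List (String × Int)) (r : String) : List Int :=
  (qs.filter (fun q => q.1 == r)).map (fun q => q.2)

def pvAggD (vals : List Int) : PySem.Dict String Int :=
  PySem.Dict.mk [("min_points", vals.foldl min 2), ("++", (vals.count 2 : Int))]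

lemma pvGetMp (m c : Int) :
    (PySem.Dict.mk [("min_points", m), ("++", c)] : PySem.Dict String Int).getD "min_points" 0 = m := by
  simp [PySem.Dict.getD, PySem.Dict.get?]

lemma pvInsMp (m c v : Int) :
    (PySem.Dict.mk [("min_points", m), ("++", c)] : PySem.Dict String Int).insert "min_points" v
      = PySem.Dict.mk [("min_points", v), ("++", c)] := by
  simp [PySem.Dict.insert]

lemma pvModPp (m c : Int) :
    (PySem.Dict.mk [("min_points", m), ("++", c)] : PySem.Dict String Int).modify "++" 0 (· + 1)
      = PySem.Dict.mk [("min_points", m), ("++", c + 1)] := by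
  simp [PySem.Dict.modify, PySem.Dict.getD, PySem.Dict.get?, PySem.Dict.insert]

lemma pvInit :
    ((PySem.Dict.empty.insert "min_points" 2).insert "++" 0 : PySem.Dict String Int)
      = PySem.Dict.mk [("min_points", 2), ("++", 0)] := by decide

lemma pvBeqDecide (a b : String) : (a == b) = decide (a = b) := by
  by_cases h : a = b <;> simp [h]

lemma pvMapPoint_le_two (s : String) : pvMapPoint s ≤ 2 := by
  unfold pvMapPoint
  have hget : pvPointMapper.get? s
      = Option.map (fun x => x.2) (pvPointMapper.items.find? (fun p => p.1 == s)) := rfl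
  have hitems : pvPointMapper.items
      = [("++", (2 : Int)), ("+", 1), ("-", -1), ("--", -2)] := by decide
  rcases hf : pvPointMapper.items.find? (fun p => p.1 == s) with _ | p
  · simp [hget, hf]
  · have hp := List.mem_of_find?_eq_some hf
    rw [hitems] at hp
    rw [hget, hf]
    simp only [Option.map_some, Option.getD_some]
    simp only [List.mem_cons, List.not_mem_nil, or_false] at hp
    rcases hp with rfl | rfl | rfl | rfl <;> norm_num

lemma pvStep_hit (d : PySem.Dict String (PySem.Dict String Int)) (r : String) (v m c : Int)
    (hc : d.contains r = true)
    (hd : d.getD r PySem.Dict.empty = PySem.Dict.mk [("min_points", m), ("++", c)]) :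
    (pvStepA' d (r, v)).getD r PySem.Dict.empty
      = PySem.Dict.mk [("min_points", min m v), ("++", c + if v = 2 then 1 else 0)] := by
  dsimp only [pvStepA']
  rw [hc]
  simp only [Bool.not_true, Bool.false_eq_true, if_false, hd, pvGetMp, beq_iff_eq]
  by_cases h1 : v < m
  · have hmin : min m v = v := by omega
    by_cases h2 : v = 2
    · simp only [if_pos h1, if_pos h2, PySem.Dict.getD_modify_self, hd, pvInsMp, pvModPp, hmin]
    · simp only [if_pos h1, if_neg h2, PySem.Dict.getD_modify_self, hd, pvInsMp, hmin, add_zero]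
  · have hmin : min m v = m := by omega
    by_cases h2 : v = 2
    · simp only [if_neg h1, if_pos h2, PySem.Dict.getD_modify_self, hd, pvModPp, hmin]
    · simp only [if_neg h1, if_neg h2, hd, hmin, add_zero]

lemma pvStep_fresh (d : PySem.Dict String (PySem.Dict String Int)) (r : String) (v : Int)
    (hc : d.contains r = false) :
    (pvStepA' d (r, v)).getD r PySem.Dict.empty
      = PySem.Dict.mk [("min_points", min 2 v), ("++", if v = 2 then (1 : Int) else 0)] := by
  dsimp only [pvStepA']
  rw [hc]
  simp only [Bool.not_false, if_true, pvInit, PySem.Dict.getD_insert_self, pvGetMp, beq_iff_eq]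
  by_cases h1 : v < 2
  · have hmin : min 2 v = v := by omega
    have h2 : ¬ v = 2 := by omega
    simp only [if_pos h1, if_neg h2, PySem.Dict.getD_modify_self, PySem.Dict.getD_insert_self,
      pvInsMp, hmin]
  · have hmin : min 2 v = 2 := by omega
    by_cases h2 : v = 2
    · simp only [if_neg h1, if_pos h2, PySem.Dict.getD_modify_self, PySem.Dict.getD_insert_self,
        pvModPp, hmin, zero_add]
    · simp only [if_neg h1, if_neg h2, PySem.Dict.getD_insert_self, hmin]

lemma pvStep_getD_ne (d : PySem.Dict String (PySem.Dict String Int)) (q : String × Int)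
    (r : String) (h : r ≠ q.1) :
    (pvStepA' d q).getD r PySem.Dict.empty = d.getD r PySem.Dict.empty := by
  dsimp only [pvStepA']
  split_ifs <;>
    simp only [PySem.Dict.getD_modify_of_ne (hne := h), PySem.Dict.getD_insert_of_ne (hne := h)]

lemma pvStep_contains (d : PySem.Dict String (PySem.Dict String Int)) (q : String × Int)
    (r : String) :
    (pvStepA' d q).contains r = (r == q.1 || d.contains r) := by
  dsimp only [pvStepA']
  by_cases hc : d.contains q.1
  · have hor : (r == q.1 || d.contains r) = d.contains r := by
      cases hb : (r == q.1)
      · simp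
      · have : r = q.1 := by simpa [pvBeqDecide] using hb
        simp [this, hc]
    rw [hc]
    simp only [Bool.not_true, Bool.false_eq_true, if_false]
    split_ifs <;> simp [PySem.Dict.contains_modify, hor]
  · have hc' : d.contains q.1 = false := by simpa using hc
    rw [hc']
    simp only [Bool.not_false, if_true]
    split_ifs <;>
      simp [PySem.Dict.contains_modify, PySem.Dict.contains_insert]

lemma pvFold_contains (qs : List (String × Int)) (d : PySem.Dict String (PySem.Dict String Int))
    (r : String) :
    (qs.foldl pvStepA' d).contains r = (d.contains r || decide (r ∈ qs.map (fun q => q.1))) := by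
  induction qs generalizing d with
  | nil => simp
  | cons q qs ih =>
    simp only [List.foldl_cons, ih, pvStep_contains, List.map_cons, List.mem_cons]
    by_cases h : r = q.1 <;> simp [h, pvBeqDecide]

lemma pvFilter_nil_of_not_mem (qs : List (String × Int)) (r : String)
    (h : r ∉ qs.map (fun q => q.1)) : qs.filter (fun q => q.1 == r) = [] := by
  rw [List.filter_eq_nil_iff]
  intro q hq
  simp only [pvBeqDecide, decide_eq_true_eq]
  intro hqr
  exact h (by simpa [hqr.symm] using List.mem_map_of_mem (f := fun q => q.1) hq)

lemma pvVs_append_ne (qs : List (String × Int)) (q : String × Int) (r : String)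
    (h : ¬ r = q.1) : pvVs (qs ++ [q]) r = pvVs qs r := by
  unfold pvVs
  rw [List.filter_append]
  have hq : (q.1 == r) = false := by
    rw [pvBeqDecide]
    exact decide_eq_false (fun hh => h hh.symm)
  simp [List.filter, hq]

lemma pvVs_append_self (qs : List (String × Int)) (r : String) (v : Int) :
    pvVs (qs ++ [(r, v)]) r = pvVs qs r ++ [v] := by
  unfold pvVs
  rw [List.filter_append]
  simp [List.filter]

lemma pvCount_singleton (v : Int) : (([v] : List Int).count 2 : Int) = if v = 2 then 1 else 0 := by
  by_cases h : v = 2 <;> simp [h]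

lemma pvFoldA_getD (qs : List (String × Int)) (r : String)
    (hr : r ∈ qs.map (fun q => q.1)) :
    (qs.foldl pvStepA' PySem.Dict.empty).getD r PySem.Dict.empty = pvAggD (pvVs qs r) := by
  induction qs using List.reverseRecOn with
  | nil => simp at hr
  | append_singleton qs q ih =>
    rw [List.foldl_append, List.foldl_cons, List.foldl_nil]
    rcases q with ⟨r', v⟩
    by_cases hq : r = r'
    · subst hq
      by_cases hmem : r ∈ qs.map (fun q => q.1)
      · have hc : (qs.foldl pvStepA' PySem.Dict.empty).contains r = true := by
          rw [pvFold_contains]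
          simp [hmem]
        rw [pvStep_hit _ _ v ((pvVs qs r).foldl min 2) ((pvVs qs r).count 2 : Int) hc
          (by rw [ih hmem]; rfl)]
        rw [pvVs_append_self]
        unfold pvAggD
        rw [List.foldl_append, List.foldl_cons, List.foldl_nil, List.count_append]
        have hcnt : ((pvVs qs r).count 2 + ([v] : List Int).count 2 : Int)
            = ((pvVs qs r).count 2 : Int) + (if v = 2 then 1 else 0) := by
          rw [← pvCount_singleton]
        simp only [Nat.cast_add, hcnt]
      · have hc : (qs.foldl pvStepA' PySem.Dict.empty).contains r = false := by
          rw [pvFold_contains]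
          simp [hmem]
        rw [pvStep_fresh _ _ _ hc, pvVs_append_self]
        have hnil : pvVs qs r = [] := by
          unfold pvVs
          rw [pvFilter_nil_of_not_mem qs r hmem]
          rfl
        rw [hnil]
        unfold pvAggD
        simp only [List.nil_append, List.foldl_cons, List.foldl_nil, pvCount_singleton]
    · rw [pvStep_getD_ne _ _ _ (by simpa using hq), pvVs_append_ne _ _ _ hq]
      have hmem : r ∈ qs.map (fun q => q.1) := by
        rw [List.map_append] at hr
        rcases List.mem_append.mp hr with h | h
        · exact h
        · exact absurd (by simpa using h) hq
      exact ih hmem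

lemma pvContains_keys {ν : Type} (d : PySem.Dict String ν) (k : String) :
    PySem.Set.contains d.keys k = d.contains k := by
  by_cases h : k ∈ d.keys
  · have hiff : d.contains k = true ↔ k ∈ d.keys := PySem.Dict.contains_iff_mem_keys ..
    rw [hiff.mpr h]
    simpa [PySem.Set.contains] using h
  · have hiff : d.contains k = true ↔ k ∈ d.keys := PySem.Dict.contains_iff_mem_keys ..
    have h1 : d.contains k = false := by
      rcases hb : d.contains k with _ | _
      · rfl
      · exact absurd (hiff.mp hb) h
    rw [h1]
    simpa [PySem.Set.contains] using h

lemma pvStep_keys (d : PySem.Dict String (PySem.Dict String Int)) (q : String × Int) :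
    (pvStepA' d q).keys = PySem.Set.add d.keys q.1 := by
  have hadd : PySem.Set.add d.keys q.1
      = if d.contains q.1 then d.keys else d.keys ++ [q.1] := by
    show (if PySem.Set.contains d.keys q.1 then d.keys else d.keys ++ [q.1]) = _
    rw [pvContains_keys]
  dsimp only [pvStepA']
  by_cases hc : d.contains q.1
  · rw [hc]
    simp only [Bool.not_true, Bool.false_eq_true, if_false, hadd, if_pos hc]
    split_ifs <;>
      simp [PySem.Dict.keys_modify, PySem.Dict.keys_insert_of_contains,
        PySem.Dict.contains_modify, hc]
  · have hc' : d.contains q.1 = false := by simpa using hc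
    rw [hc']
    simp only [Bool.not_false, if_true, hadd, if_neg hc]
    split_ifs <;>
      simp [PySem.Dict.keys_modify, PySem.Dict.keys_insert_of_contains,
        PySem.Dict.keys_insert_of_not_contains, PySem.Dict.contains_modify, hc']

lemma pvFoldA_keys (qs : List (String × Int)) (d : PySem.Dict String (PySem.Dict String Int)) :
    (qs.foldl pvStepA' d).keys = PySem.Set.update d.keys (qs.map (fun q => q.1)) := by
  induction qs generalizing d with
  | nil => rfl
  | cons q qs ih =>
    rw [List.foldl_cons, ih, pvStep_keys, List.map_cons]
    rfl

lemma pvFoldl_flatMap {α β γ : Type} (l : List α) (f : α → List β) (g : γ → β → γ) (init : γ) :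
    l.foldl (fun acc x => (f x).foldl g acc) init = (l.flatMap f).foldl g init := by
  induction l generalizing init with
  | nil => rfl
  | cons a l ih => rw [List.foldl_cons, List.flatMap_cons, List.foldl_append, ih]

lemma pvA_eq_fold (restaurants : List (String × List (String × String))) :
    restaurants.foldl (fun d r => r.2.foldl pvStepA d) PySem.Dict.empty
      = (pvQs restaurants).foldl pvStepA' PySem.Dict.empty := by
  unfold pvQs
  rw [List.foldl_map, ← pvFoldl_flatMap]
  rfl

lemma pvB_eq_fold (restaurants : List (String × List (String × String))) :
    restaurants.foldl
      (fun g r => r.2.foldl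
        (fun g p => g.modify p.1 [] (fun vals => vals ++ [pvMapPoint p.2])) g)
      PySem.Dict.empty
      = (pvQs restaurants).foldl
          (fun g q => g.modify q.1 [] (fun vals => vals ++ [q.2])) PySem.Dict.empty := by
  unfold pvQs
  rw [List.foldl_map, ← pvFoldl_flatMap]

lemma pvQs_snd_le (restaurants : List (String × List (String × String)))
    (q : String × Int) (hq : q ∈ pvQs restaurants) : q.2 ≤ 2 := by
  obtain ⟨p, _, rfl⟩ := List.mem_map.mp hq
  exact pvMapPoint_le_two _

lemma pvMin_bridge (l : List Int) (hne : l ≠ []) (hle : ∀ x ∈ l, x ≤ 2) :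
    (PySem.List.min? l (fun v => v)).getD 0 = l.foldl min 2 := by
  obtain ⟨x, t, rfl⟩ := List.exists_cons_of_ne_nil hne
  rw [PySem.List.min?_id_cons]
  simp only [Option.getD_some]
  rw [List.foldl_cons]
  have hx : min 2 x = x := by
    have := hle x (by simp)
    omega
  rw [hx]

lemma pvVs_mem_le (qs : List (String × Int)) (hqs : ∀ q ∈ qs, q.2 ≤ 2) (r : String) :
    ∀ x ∈ pvVs qs r, x ≤ 2 := by
  intro x hx
  obtain ⟨q, hq, rfl⟩ := List.mem_map.mp hx
  exact hqs q (List.mem_of_mem_filter hq)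

lemma pvVs_ne_nil (qs : List (String × Int)) (r : String)
    (hr : r ∈ qs.map (fun q => q.1)) : pvVs qs r ≠ [] := by
  obtain ⟨q, hq, rfl⟩ := List.mem_map.mp hr
  unfold pvVs
  intro hcon
  have : q ∈ qs.filter (fun p => p.1 == q.1) := by
    rw [List.mem_filter]
    exact ⟨hq, by simp⟩
  rw [List.map_eq_nil_iff.mp hcon] at this
  simp at this

-- ===== VERDICT (by name: the statement is the Claim_ definition above) =====
theorem get_rest_scores_spec : Claim_equal_get_rest_scores := by
  intro restaurants _ _
  unfold Spec_get_rest_scores get_rest_scores get_rest_scores_alt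
  dsimp only
  rw [pvA_eq_fold, pvB_eq_fold]
  have hqs := pvQs_snd_le restaurants
  generalize hQ : pvQs restaurants = qs at *
  have hkA : (qs.foldl pvStepA' PySem.Dict.empty).keys
      = PySem.Set.ofList (qs.map (fun q => q.1)) := by
    rw [pvFoldA_keys]
    rfl
  have hkB : ((qs.foldl (fun g q => g.modify q.1 [] (fun vals => vals ++ [q.2]))
      (PySem.Dict.empty : PySem.Dict String (List Int))).keys)
      = PySem.Set.ofList (qs.map (fun q => q.1)) := by
    rw [PySem.Dict.keys_foldl_modify_key]
    rfl
  have hndA : (qs.foldl pvStepA' PySem.Dict.empty).keys.Nodup := by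
    rw [hkA]; exact PySem.Set.nodup_ofList _
  have hndB : ((qs.foldl (fun g q => g.modify q.1 [] (fun vals => vals ++ [q.2]))
      (PySem.Dict.empty : PySem.Dict String (List Int))).keys).Nodup := by
    rw [hkB]; exact PySem.Set.nodup_ofList _
  rw [PySem.Dict.items_eq_map_keys _ hndA PySem.Dict.empty,
    PySem.Dict.items_eq_map_keys _ hndB ([] : List Int), hkA, hkB, List.map_map, List.map_map]
  apply List.map_congr_left
  intro r hrmem
  have hiff : r ∈ PySem.Set.ofList (qs.map (fun q => q.1)) ↔ r ∈ qs.map (fun q => q.1) :=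
    PySem.Set.mem_ofList ..
  have hr : r ∈ qs.map (fun q => q.1) := hiff.mp hrmem
  simp only [Function.comp]
  rw [pvFoldA_getD qs r hr, PySem.Dict.getD_foldl_modify_append]
  have hvs : ([] : List Int) ++ (qs.filter (fun p => p.1 == r)).map (fun p => p.2) = pvVs qs r := by
    rw [List.nil_append]; rfl
  rw [PySem.Dict.getD_empty, hvs,
    pvMin_bridge (pvVs qs r) (pvVs_ne_nil qs r hr) (pvVs_mem_le qs hqs r)]
  rfl
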